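-- pv_equiv track=rewrite | github.com/ivanfeliciano/30-days-leet-coding-challenge | day_9_backspace_string_compare.py | backspaceCompare
-- ===== SOURCE A (Python) =====
-- def backspaceCompare(S, T):
--     stack_s = ""
--     stack_t = ""
--     for i in range(len(S)):
--         if S[i] != "#": stack_s += S[i]
--         if i > 0 and S[i] == "#":
--             stack_s = stack_s[:-1]
--     for i in range(len(T)):
--         if T[i] != "#": stack_t += T[i]
--         if i > 0 and T[i] == "#":
--             stack_t = stack_t[:-1]
--     return stack_s == stack_t
-- ===== SOURCE B (Python) =====
-- def backspaceCompare(S, T):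
--     def final(s):
--         out = []
--         skip = 0
--         for c in reversed(s):
--             if c == '#':
--                 skip += 1
--             elif skip > 0:
--                 skip -= 1
--             else:
--                 out.append(c)
--         return out
--     return final(S) == final(T)
-- ===== Notes on version B (the rewrite author's own statement) =====
-- stated objective: faster
-- what changed: Instead of simulating a stack of kept characters front-to-back with string concatenation and slicing, B scans each string from the END with a pending-backspace counter, emitting only the surviving characters (in reverse) in one O(n) pass with no stack edits.
import Mathlib
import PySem

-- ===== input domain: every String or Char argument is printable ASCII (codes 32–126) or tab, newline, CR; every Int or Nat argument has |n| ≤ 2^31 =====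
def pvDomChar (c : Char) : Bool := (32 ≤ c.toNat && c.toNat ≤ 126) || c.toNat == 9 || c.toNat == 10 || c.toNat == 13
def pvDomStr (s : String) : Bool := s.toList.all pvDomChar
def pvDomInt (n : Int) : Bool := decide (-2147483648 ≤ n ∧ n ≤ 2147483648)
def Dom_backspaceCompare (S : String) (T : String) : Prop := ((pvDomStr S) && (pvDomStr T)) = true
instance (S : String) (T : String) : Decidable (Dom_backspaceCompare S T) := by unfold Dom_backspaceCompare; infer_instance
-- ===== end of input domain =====

-- B replaces A's front-to-back stack simulation (string += / [:-1]) with a single reverse scan per string that counts pending backspaces and emits surviving characters: asymptotically faster.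


-- ===== PORT A =====
-- one loop iteration of A: 'if S[i] != "#": stack += S[i]; if i > 0 and S[i] == "#": stack = stack[:-1]'
-- (strings handled as List Char; '+= c' is '++ [c]'; 'stack[:-1]' is List.dropLast, exact for Python s[:-1])
def pvStepA (st : List Char) (p : Int × Char) : List Char :=
  let st1 := if p.2 ≠ '#' then st ++ [p.2] else st
  if p.1 > 0 ∧ p.2 = '#' then st1.dropLast else st1

-- 'stack = ""; for i in range(len(s)): …' — the index/char loop via enumerate
def pvLoopA (s : List Char) : List Char :=
  (PySem.List.enumerate s).foldl pvStepA []

def backspaceCompare (S : String) (T : String) : Bool :=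
  pvLoopA S.toList == pvLoopA T.toList

-- ===== PORT B =====
-- Source B's final(): 'out = []; skip = 0; for c in reversed(s): …' — the loop over the reversed string,
-- with 'out.append(c)' ported as 'out ++ [c]'
def pvFinalLoop : List Char → Nat → List Char → List Char
  | [], _, out => out
  | c :: rest, skip, out =>
    if c = '#' then pvFinalLoop rest (skip + 1) out
    else if skip > 0 then pvFinalLoop rest (skip - 1) out
    else pvFinalLoop rest skip (out ++ [c])

def pvFinalB (s : List Char) : List Char :=
  pvFinalLoop s.reverse 0 []

def backspaceCompare_alt (S : String) (T : String) : Bool :=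
  pvFinalB S.toList == pvFinalB T.toList

-- ===== PRECONDITION & SPEC =====
def Spec_backspaceCompare (S : String) (T : String) (out : Bool) : Prop := out = backspaceCompare_alt S T
instance (S : String) (T : String) (out : Bool) : Decidable (Spec_backspaceCompare S T out) := by unfold Spec_backspaceCompare; infer_instance

-- ===== CLAIM (what is proved, stated in full; the proofs are below) =====
def Claim_equal_backspaceCompare : Prop := ∀ (S : String) (T : String), Dom_backspaceCompare S T → Spec_backspaceCompare S T (backspaceCompare S T)

-- ===== LEMMAS AND PROOFS =====

-- proof-only helper: the unguarded forward stack fold (dropLast [] = [] absorbs A's i > 0 guard)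
def pvStepF (st : List Char) (c : Char) : List Char :=
  if c = '#' then st.dropLast else st ++ [c]

def pvFwd (s : List Char) : List Char := s.foldl pvStepF []

-- at a positive index A's step is the unguarded forward step
lemma stepA_eq_stepF (st : List Char) (i : Int) (c : Char) (hi : 0 < i) :
    pvStepA st (i, c) = pvStepF st c := by
  by_cases hc : c = '#'
  · simp [pvStepA, pvStepF, hc, hi]
  · simp [pvStepA, pvStepF, hc]

-- the tail of A's loop (indices ≥ 1) is the forward fold
lemma foldA_tail (s : List Char) : ∀ (k : Int) (st : List Char), 0 < k →
    (PySem.List.enumerate s k).foldl pvStepA st = s.foldl pvStepF st := by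
  induction s with
  | nil => intro k st _; simp [PySem.List.enumerate_nil]
  | cons c cs ih =>
    intro k st hk
    rw [PySem.List.enumerate_cons]
    simp only [List.foldl_cons]
    rw [stepA_eq_stepF st k c hk]
    exact ih (k + 1) (pvStepF st c) (by omega)

-- A's whole loop is the forward fold (index 0 on the empty stack agrees too)
lemma loopA_eq_fwd (s : List Char) : pvLoopA s = pvFwd s := by
  cases s with
  | nil => simp [pvLoopA, pvFwd, PySem.List.enumerate_nil]
  | cons c cs =>
    unfold pvLoopA pvFwd
    rw [PySem.List.enumerate_cons]
    simp only [List.foldl_cons]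
    have h0 : pvStepA [] (0, c) = pvStepF [] c := by
      by_cases hc : c = '#' <;> simp [pvStepA, pvStepF, hc]
    rw [h0]
    exact foldA_tail cs 1 (pvStepF [] c) (by omega)

-- invariant of B's reverse scan: with r the unscanned prefix (reversed) and skip pending backspaces,
-- the loop returns out ++ (the forward-stack result of the prefix, reversed, minus skip chars)
lemma finalLoop_inv : ∀ (r : List Char) (k : Nat) (out : List Char),
    pvFinalLoop r k out = out ++ ((pvFwd r.reverse).reverse.drop k) := by
  intro r
  induction r with
  | nil => intro k out; simp [pvFinalLoop, pvFwd]
  | cons c rest ih =>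
    intro k out
    have hfwd : pvFwd ((c :: rest).reverse) = pvStepF (pvFwd rest.reverse) c := by
      simp [pvFwd, List.foldl_append]
    by_cases hc : c = '#'
    · subst hc
      rw [pvFinalLoop, if_pos rfl, ih (k + 1) out]
      congr 1
      rw [hfwd]
      simp [pvStepF, ← List.tail_reverse, ← List.drop_one, List.drop_drop]
      omega
    · rcases k with _ | j
      · rw [pvFinalLoop, if_neg hc, if_neg (lt_irrefl 0), ih 0 (out ++ [c])]
        rw [hfwd]
        simp [pvStepF, hc]
      · rw [pvFinalLoop, if_neg hc, if_pos (Nat.succ_pos j), ih (j + 1 - 1) out]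
        rw [hfwd]
        simp [pvStepF, hc]

-- B's build is the forward-stack result reversed
lemma finalB_eq_fwd_reverse (s : List Char) : pvFinalB s = (pvFwd s).reverse := by
  rw [pvFinalB, finalLoop_inv s.reverse 0 [], List.reverse_reverse]
  simp

-- ===== VERDICT (by name: the statement is the Claim_ definition above) =====
theorem backspaceCompare_spec : Claim_equal_backspaceCompare := by
  intro S T _
  unfold Spec_backspaceCompare backspaceCompare backspaceCompare_alt
  rw [loopA_eq_fwd, loopA_eq_fwd, finalB_eq_fwd_reverse, finalB_eq_fwd_reverse]
  simp [List.reverse_inj]
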